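-- pv_equiv track=rewrite | github.com/aysbukre/TermProject303 | main.py | shortenings
-- ===== SOURCE A (Python) =====
-- from itertools import product
--
-- def shortenings(word):
--     # Return flat option list of all possible variations of the word by removing duplicate letters.
--     word = list(word)
--     for i, l in enumerate(word):
--         n = count_duplicates(word, i)
--         if n:
--             flat_dupes = [l*(r+1) for r in range(n+1)][:3]
--             for _ in range(n):
--                 word.pop(i+1)
--
--             word[i] = flat_dupes
--
--     for p in product(*word):
--         yield ''.join(p)
--
-- def count_duplicates(string, i):
--     # Count how many times a character appears after index `i` in `string`.
--     initial_i = i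
--     last = string[i]
--     while i+1 < len(string) and string[i+1] == last:
--         i += 1
--     return i-initial_i
-- ===== SOURCE B (Python) =====
-- from itertools import product
--
-- def shortenings(word):
--     # Single left-to-right fold building (char, run_length) pairs, then an
--     # option list per run (lengths 1..min(L,3)) fed to product.
--     runs = []
--     for c in word:
--         if runs and runs[-1][0] == c:
--             runs[-1][1] += 1
--         else:
--             runs.append([c, 1])
--     options = [[c * k for k in range(1, min(n, 3) + 1)] for c, n in runs]
--     for p in product(*options):
--         yield ''.join(p)
-- ===== Notes on version B (the rewrite author's own statement) =====
-- stated objective: idiomatic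
-- what changed: Replaces A's in-place enumerate+pop list mutation with count_duplicates re-scans by a single fold that groups the word into (char, run-length) pairs and builds each run's option list directly.
import Mathlib
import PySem

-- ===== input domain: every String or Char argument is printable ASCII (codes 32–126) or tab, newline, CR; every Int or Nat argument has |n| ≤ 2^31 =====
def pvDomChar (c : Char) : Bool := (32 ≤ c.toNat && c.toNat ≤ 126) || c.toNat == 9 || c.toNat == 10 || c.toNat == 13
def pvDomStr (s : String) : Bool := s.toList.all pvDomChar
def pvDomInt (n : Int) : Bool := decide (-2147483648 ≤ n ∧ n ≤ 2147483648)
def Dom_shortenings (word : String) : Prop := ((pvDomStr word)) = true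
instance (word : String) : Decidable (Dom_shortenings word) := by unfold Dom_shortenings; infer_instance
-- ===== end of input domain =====

-- B replaces A's in-place enumerate+pop mutation (with a count_duplicates helper)
-- by one fold grouping the word into (char, run-length) pairs; same generated list.

-- ===== PORT A =====
-- port of count_duplicates(string, i): counts consecutive chars after i equal to string[i];
-- here `last` is string[i] and the list is the suffix after i.
def countDupA (last : Char) : List Char → Nat
  | [] => 0
  | c :: cs => if c = last then countDupA last cs + 1 else 0

-- shared transliteration of the itertools.product(*opts) + ''.join loop both Pythons end with
def pyProductJoin : List (List String) → List String
  | [] => [""]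
  | opts :: rest => opts.flatMap (fun s => (pyProductJoin rest).map (fun t => s ++ t))

-- A's enumerate loop: at each position count duplicates, pop them, replace the slot
-- by the truncated option list (a 1-char string when n = 0, iterated as its chars by product).
def loopA : List Char → List (List String)
  | [] => []
  | c :: cs =>
    let n := countDupA c cs
    (if n ≠ 0 then
        ((List.range (n + 1)).map (fun r => String.mk (List.replicate (r + 1) c))).take 3
      else [String.mk [c]]) :: loopA (cs.drop n)
  termination_by l => l.length
  decreasing_by simp

def shortenings (word : String) : List String := pyProductJoin (loopA word.toList)

-- ===== PORT B =====
-- one step of B's fold: extend the last run or append a new one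
def stepRun (runs : List (Char × Nat)) (c : Char) : List (Char × Nat) :=
  match runs.getLast? with
  | some (d, n) => if d = c then runs.dropLast ++ [(d, n + 1)] else runs ++ [(c, 1)]
  | none => [(c, 1)]

def shortenings_alt (word : String) : List String :=
  let runs := word.toList.foldl stepRun []
  let options := runs.map (fun (p : Char × Nat) =>
    (List.range' 1 (min p.2 3)).map (fun k => String.mk (List.replicate k p.1)))
  pyProductJoin options

-- ===== PRECONDITION & SPEC =====
def Spec_shortenings (word : String) (out : List String) : Prop := out = shortenings_alt word
instance (word : String) (out : List String) : Decidable (Spec_shortenings word out) := by unfold Spec_shortenings; infer_instance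

-- ===== CLAIM (what is proved, stated in full; the proofs are below) =====
def Claim_equal_shortenings : Prop := ∀ (word : String), Dom_shortenings word → Spec_shortenings word (shortenings word)

-- ===== LEMMAS AND PROOFS =====

-- canonical run decomposition both ports are reduced to
def runsC : List Char → List (Char × Nat)
  | [] => []
  | c :: cs => (c, countDupA c cs + 1) :: runsC (cs.drop (countDupA c cs))
  termination_by l => l.length
  decreasing_by simp

lemma runsC_nil : runsC [] = [] := by rw [runsC]

lemma runsC_cons (c : Char) (cs : List Char) :
    runsC (c :: cs) = (c, countDupA c cs + 1) :: runsC (cs.drop (countDupA c cs)) := by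
  rw [runsC]

-- B's fold seeded with an open run (d, n)
def foldSeed (d : Char) (n : Nat) : List Char → List (Char × Nat)
  | [] => [(d, n)]
  | c :: cs => if c = d then foldSeed d (n + 1) cs else (d, n) :: foldSeed c 1 cs

lemma foldl_stepRun_concat (l : List Char) : ∀ (rs : List (Char × Nat)) (d : Char) (n : Nat),
    List.foldl stepRun (rs ++ [(d, n)]) l = rs ++ foldSeed d n l := by
  induction l with
  | nil => intro rs d n; simp [foldSeed]
  | cons c cs ih =>
    intro rs d n
    by_cases h : d = c
    · have e1 : stepRun (rs ++ [(d, n)]) c = rs ++ [(d, n + 1)] := by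
        simp [stepRun, List.getLast?_concat, h]
      have e2 : foldSeed d n (c :: cs) = foldSeed d (n + 1) cs := by
        simp [foldSeed, h.symm]
      rw [List.foldl_cons, e1, e2, ih]
    · have h' : ¬c = d := fun hc => h hc.symm
      have e1 : stepRun (rs ++ [(d, n)]) c = (rs ++ [(d, n)]) ++ [(c, 1)] := by
        simp [stepRun, List.getLast?_concat, h]
      have e2 : foldSeed d n (c :: cs) = (d, n) :: foldSeed c 1 cs := by
        simp [foldSeed, h']
      rw [List.foldl_cons, e1, e2, ih]
      simp

lemma foldSeed_eq_runs (l : List Char) : ∀ (d : Char) (n : Nat),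
    foldSeed d n l = (d, n + countDupA d l) :: runsC (l.drop (countDupA d l)) := by
  induction l with
  | nil => intro d n; simp [foldSeed, countDupA, runsC_nil]
  | cons c cs ih =>
    intro d n
    by_cases h : c = d
    · subst h
      have e1 : foldSeed c n (c :: cs) = foldSeed c (n + 1) cs := by simp [foldSeed]
      have e2 : countDupA c (c :: cs) = countDupA c cs + 1 := by simp [countDupA]
      have e3 : n + 1 + countDupA c cs = n + (countDupA c cs + 1) := by omega
      rw [e1, ih, e2, List.drop_succ_cons, e3]
    · have e1 : foldSeed d n (c :: cs) = (d, n) :: foldSeed c 1 cs := by simp [foldSeed, h]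
      have e2 : countDupA d (c :: cs) = 0 := by simp [countDupA, h]
      rw [e1, e2, ih c 1]
      simp [runsC_cons, Nat.add_comm]

lemma foldl_stepRun_eq_runsC (l : List Char) : List.foldl stepRun [] l = runsC l := by
  cases l with
  | nil => rw [runsC_nil]; rfl
  | cons c cs =>
    have h1 : List.foldl stepRun [] (c :: cs) = List.foldl stepRun ([] ++ [(c, 1)]) cs := by
      simp [stepRun]
    rw [h1, foldl_stepRun_concat, foldSeed_eq_runs, runsC_cons]
    simp [Nat.add_comm]

lemma optsA_eq (c : Char) (n : Nat) :
    ((List.range (n + 1)).map (fun r => String.mk (List.replicate (r + 1) c))).take 3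
      = (List.range' 1 (min (n + 1) 3)).map (fun k => String.mk (List.replicate k c)) := by
  rw [← List.map_take, List.take_range, List.range'_eq_map_range]
  rw [List.map_map, Nat.min_comm]
  apply List.map_congr_left
  intro r _
  simp [Nat.add_comm]

lemma loopA_eq_map_runsC (l : List Char) :
    loopA l = (runsC l).map (fun p : Char × Nat =>
      (List.range' 1 (min p.2 3)).map (fun k => String.mk (List.replicate k p.1))) := by
  have key : ∀ (m : Nat) (l : List Char), l.length ≤ m → loopA l = (runsC l).map
      (fun p : Char × Nat =>
        (List.range' 1 (min p.2 3)).map (fun k => String.mk (List.replicate k p.1))) := by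
    intro m
    induction m with
    | zero =>
      intro l h
      have : l = [] := List.eq_nil_of_length_eq_zero (Nat.le_zero.mp h)
      subst this
      rw [loopA, runsC_nil]; rfl
    | succ m ih =>
      intro l h
      cases l with
      | nil => rw [loopA, runsC_nil]; rfl
      | cons c cs =>
        rw [loopA, runsC_cons]
        simp only [List.map_cons]
        have hlen : (cs.drop (countDupA c cs)).length ≤ m := by
          simp at h ⊢; omega
        rw [ih _ hlen]
        congr 1
        by_cases h0 : countDupA c cs = 0
        · simp [h0, List.range']
        · simp only [if_pos h0, optsA_eq c (countDupA c cs)]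
  exact key l.length l le_rfl

-- ===== VERDICT (by name: the statement is the Claim_ definition above) =====
theorem shortenings_spec : Claim_equal_shortenings := by
  intro word _
  unfold Spec_shortenings shortenings shortenings_alt
  exact congrArg pyProductJoin (by rw [foldl_stepRun_eq_runsC, ← loopA_eq_map_runsC])
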